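-- pv_equiv track=rewrite | github.com/francoismartineau/tar_backup | recover.py | get_archive_by_number
-- ===== SOURCE A (Python) =====
-- def get_archive_by_number(archive, i):
--     new_archive = ""
--     put_i = False
--     for c in archive:
--         if not c.isdigit():
--             new_archive += c
--         elif not put_i:
--             new_archive += str(i)
--             put_i = True
--     return new_archive
-- ===== SOURCE B (Python) =====
-- def get_archive_by_number(archive, i):
--     first = next((k for k, c in enumerate(archive) if c.isdigit()), None)
--     if first is None:
--         return archive
--     prefix = archive[:first]
--     suffix = ''.join(c for c in archive[first+1:] if not c.isdigit())
--     return prefix + str(i) + suffix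
-- ===== Notes on version B (the rewrite author's own statement) =====
-- stated objective: idiomatic
-- what changed: Replaces the flag-gated character-accumulation loop with a locate-then-slice shape: find the first digit's index, keep the prefix unchanged, insert str(i), and filter digits only from the tail.
import Mathlib
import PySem

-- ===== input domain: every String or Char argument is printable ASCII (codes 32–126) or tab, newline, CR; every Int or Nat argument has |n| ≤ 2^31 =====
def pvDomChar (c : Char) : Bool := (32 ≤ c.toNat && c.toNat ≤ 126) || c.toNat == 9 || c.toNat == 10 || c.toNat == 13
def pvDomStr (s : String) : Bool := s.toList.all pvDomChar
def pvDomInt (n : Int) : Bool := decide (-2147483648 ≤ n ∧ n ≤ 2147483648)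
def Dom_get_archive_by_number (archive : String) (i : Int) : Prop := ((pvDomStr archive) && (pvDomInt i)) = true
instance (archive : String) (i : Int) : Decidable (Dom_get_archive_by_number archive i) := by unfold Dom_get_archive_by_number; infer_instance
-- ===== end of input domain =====

-- B replaces A's flag-gated accumulation loop by locate-first-digit, then prefix ++ str(i) ++ digit-filtered tail (idiomatic decomposition).


-- ===== PORT A =====
-- the for-loop over archive with state (new_archive, put_i), as a structural recursion over the same state
def pvALoop (i : Int) (cs : List Char) (new_archive : List Char) (put_i : Bool) : List Char :=
  match cs with
  | [] => new_archive
  | c :: rest =>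
    if !(PySem.Chars.isdigit c) then pvALoop i rest (new_archive ++ [c]) put_i
    else if !put_i then pvALoop i rest (new_archive ++ (PySem.Int.toStr i).toList) true
    else pvALoop i rest new_archive put_i

def get_archive_by_number (archive : String) (i : Int) : String :=
  String.mk (pvALoop i archive.toList [] false)

-- ===== PORT B =====
def get_archive_by_number_alt (archive : String) (i : Int) : String :=
  let cs := archive.toList
  match cs.findIdx? PySem.Chars.isdigit with
  | none => archive
  | some k =>
    String.mk (cs.take k ++ (PySem.Int.toStr i).toList
 ++ (cs.drop (k + 1)).filter (fun c => !(PySem.Chars.isdigit c)))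

-- ===== PRECONDITION & SPEC =====
def Spec_get_archive_by_number (archive : String) (i : Int) (out : String) : Prop := out = get_archive_by_number_alt archive i
instance (archive : String) (i : Int) (out : String) : Decidable (Spec_get_archive_by_number archive i out) := by unfold Spec_get_archive_by_number; infer_instance

-- ===== CLAIM (what is proved, stated in full; the proofs are below) =====
def Claim_equal_get_archive_by_number : Prop := ∀ (archive : String) (i : Int), Dom_get_archive_by_number archive i → Spec_get_archive_by_number archive i (get_archive_by_number archive i)

-- ===== LEMMAS AND PROOFS =====

-- once put_i is set, the loop just appends the non-digit filter of the rest
theorem pvALoop_true (i : Int) (cs : List Char) (acc : List Char) :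
    pvALoop i cs acc true = acc ++ cs.filter (fun c => !(PySem.Chars.isdigit c)) := by
  induction cs generalizing acc with
  | nil => simp [pvALoop]
  | cons c rest ih =>
    by_cases h : PySem.Chars.isdigit c
    · simp [pvALoop, h, ih]
    · simp [pvALoop, h, ih]

-- before put_i is set, the loop's result is B's locate-then-filter expression
theorem pvALoop_false (i : Int) (cs : List Char) (acc : List Char) :
    pvALoop i cs acc false =
      match cs.findIdx? PySem.Chars.isdigit with
      | none => acc ++ cs
      | some k => acc ++ cs.take k ++ (PySem.Int.toStr i).toList
          ++ (cs.drop (k + 1)).filter (fun c => !(PySem.Chars.isdigit c)) := by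
  induction cs generalizing acc with
  | nil => simp [pvALoop]
  | cons c rest ih =>
    by_cases h : PySem.Chars.isdigit c
    · simp [pvALoop, h, List.findIdx?_cons, pvALoop_true]
    · simp only [pvALoop, h, Bool.not_false, if_true, ih, List.findIdx?_cons, Bool.false_eq_true,
        if_false]
      cases hf : rest.findIdx? PySem.Chars.isdigit with
      | none => simp
      | some k => simp

-- ===== VERDICT (by name: the statement is the Claim_ definition above) =====
theorem get_archive_by_number_spec : Claim_equal_get_archive_by_number := by
  intro archive i _
  unfold Spec_get_archive_by_number get_archive_by_number get_archive_by_number_alt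
  rw [pvALoop_false]
  cases hf : archive.toList.findIdx? PySem.Chars.isdigit with
  | none => simp [hf, String.mk]
  | some k => simp [hf]
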